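-- pv_equiv track=rewrite | github.com/s13n/sodaCat | extractors/convert_to_blocks.py | _name_mentions_instance
-- ===== SOURCE A (Python) =====
-- def _name_mentions_instance(raw_name, instances):
--     """Check if the interrupt name mentions any of the given instance names.
--
--     Matches must be at word boundaries (start of string or after '_',
--     followed by '_', digit, or end of string).
--     """
--     raw_upper = raw_name.upper()
--     for inst in instances:
--         inst_upper = inst.upper()
--         pos = 0
--         while True:
--             idx = raw_upper.find(inst_upper, pos)
--             if idx < 0:
--                 break
--             if idx == 0 or raw_name[idx - 1] == '_':
--                 end = idx + len(inst)
--                 if end == len(raw_name) or raw_name[end] in '_0123456789':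
--                     return True
--             pos = idx + 1
--     return False
-- ===== SOURCE B (Python) =====
-- def _name_mentions_instance(raw_name, instances):
--     """Scan boundary start positions of the name once, testing each instance there."""
--     raw_upper = raw_name.upper()
--     n = len(raw_name)
--     uppers = [inst.upper() for inst in instances]
--     for i in range(n + 1):
--         if i == 0 or raw_name[i - 1] == '_':
--             for inst, inst_upper in zip(instances, uppers):
--                 end = i + len(inst)
--                 if raw_upper.startswith(inst_upper, i) and (end == n or raw_name[end] in '_0123456789'):
--                     return True
--     return False
-- ===== Notes on version B (the rewrite author's own statement) =====
-- stated objective: faster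
-- what changed: A scans the name once per instance with find(), restarting at idx+1 after every occurrence and re-checking boundaries at each; B makes a single left-to-right sweep over the boundary start positions of the name (start or after '_') and tests each instance only at those positions.
import Mathlib
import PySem

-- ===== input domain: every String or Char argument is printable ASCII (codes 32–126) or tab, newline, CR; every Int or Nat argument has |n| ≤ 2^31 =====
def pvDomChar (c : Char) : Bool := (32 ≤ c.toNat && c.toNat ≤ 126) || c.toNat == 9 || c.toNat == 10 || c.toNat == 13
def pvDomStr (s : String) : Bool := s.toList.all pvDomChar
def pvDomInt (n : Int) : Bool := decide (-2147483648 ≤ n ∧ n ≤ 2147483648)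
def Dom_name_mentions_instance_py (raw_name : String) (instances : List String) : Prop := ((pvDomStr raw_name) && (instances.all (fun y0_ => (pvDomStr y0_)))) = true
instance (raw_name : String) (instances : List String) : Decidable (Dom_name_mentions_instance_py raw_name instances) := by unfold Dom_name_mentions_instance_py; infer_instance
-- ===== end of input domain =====

-- B replaces A's per-instance find-rescan loop (restarted after every occurrence) by one
-- left-to-right sweep over the boundary start positions of the name; measured faster in a timing run.

-- ===== PORT A =====
-- termination fact for A's while-loop (pos strictly increases and stays in range); cited in decreasing_by
theorem pvFindFromBound (s sub : List Char) (k : Nat)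
    (h : PySem.Chars.findFrom s sub (k : Int) ≠ -1) :
    k ≤ (PySem.Chars.findFrom s sub (k : Int)).toNat ∧ k ≤ s.length := by
  by_cases hk : k ≤ s.length
  · obtain ⟨h1, _, _⟩ := PySem.Chars.findFrom_natCast_spec s sub k hk h
    exact ⟨by omega, hk⟩
  · exfalso
    apply h
    simp only [PySem.Chars.findFrom]
    split_ifs <;> omega

-- A's inner 'while True' loop for one instance: iu = inst.upper(), L = len(inst)
def pyAScan (rn ru iu : List Char) (L : Nat) (pos : Nat) : Bool :=
  let idx := PySem.Chars.findFrom ru iu (pos : Int)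
  if h : idx = -1 then false
  else
    let i := idx.toNat
    if ((i == 0) || ((PySem.List.pyGet? rn ((i : Int) - 1)).getD ' ' == '_'))
        && ((i + L == rn.length)
            || "_0123456789".toList.contains ((PySem.List.pyGet? rn ((i : Int) + (L : Int))).getD ' ')) then
      true
    else
      pyAScan rn ru iu L (i + 1)
termination_by ru.length + 1 - pos
decreasing_by
  have := pvFindFromBound ru iu pos h
  omega

def name_mentions_instance_py (raw_name : String) (instances : List String) : Bool :=
  let rn := raw_name.toList
  let ru := PySem.Chars.upper rn
  instances.any (fun inst => pyAScan rn ru (PySem.Chars.upper inst.toList) inst.toList.length 0)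

-- ===== PORT B =====
def name_mentions_instance_py_alt (raw_name : String) (instances : List String) : Bool :=
  let rn := raw_name.toList
  let ru := PySem.Chars.upper rn
  let n := rn.length
  let uppers := instances.map (fun inst => PySem.Chars.upper inst.toList)
  (List.range (n + 1)).any (fun i =>
    ((i == 0) || ((PySem.List.pyGet? rn ((i : Int) - 1)).getD ' ' == '_'))
      && ((instances.zip uppers).any (fun p =>
            -- raw_upper.startswith(inst_upper, i) == the slice from i starts with inst_upper
            PySem.Chars.startswith (ru.drop i) p.2
              && ((i + p.1.toList.length == n)
                  || "_0123456789".toList.contains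
                      ((PySem.List.pyGet? rn ((i : Int) + (p.1.toList.length : Int))).getD ' ')))))

-- ===== PRECONDITION & SPEC =====
def Spec_name_mentions_instance_py (raw_name : String) (instances : List String) (out : Bool) : Prop := out = name_mentions_instance_py_alt raw_name instances
instance (raw_name : String) (instances : List String) (out : Bool) : Decidable (Spec_name_mentions_instance_py raw_name instances out) := by unfold Spec_name_mentions_instance_py; infer_instance

-- ===== CLAIM (what is proved, stated in full; the proofs are below) =====
def Claim_equal_name_mentions_instance_py : Prop := ∀ (raw_name : String) (instances : List String), Dom_name_mentions_instance_py raw_name instances → Spec_name_mentions_instance_py raw_name instances (name_mentions_instance_py raw_name instances)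

-- ===== LEMMAS AND PROOFS =====

-- the shared boundary tests, as predicates (both ports write them inline)
def pvStartB (rn : List Char) (i : Nat) : Bool :=
  (i == 0) || ((PySem.List.pyGet? rn ((i : Int) - 1)).getD ' ' == '_')

def pvEndB (rn : List Char) (L i : Nat) : Bool :=
  (i + L == rn.length)
    || "_0123456789".toList.contains ((PySem.List.pyGet? rn ((i : Int) + (L : Int))).getD ' ')

-- a full match of one instance at position i
def pvMatch (rn ru iu : List Char) (L i : Nat) : Prop :=
  i ≤ ru.length ∧ iu <+: ru.drop i ∧ pvStartB rn i = true ∧ pvEndB rn L i = true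

theorem pvPrefix_drop_infix {iu ru : List Char} {p i : Nat} (hpi : p ≤ i)
    (h : iu <+: ru.drop i) : iu <:+: ru.drop p := by
  refine List.infix_iff_prefix_suffix.2 ⟨ru.drop i, h, ?_⟩
  have : ru.drop i = (ru.drop p).drop (i - p) := by
    rw [List.drop_drop]; congr 1; omega
  rw [this]; exact List.drop_suffix _ _

theorem pvAScan_iff (rn ru iu : List Char) (L pos : Nat) :
    pyAScan rn ru iu L pos = true ↔ ∃ i, pos ≤ i ∧ pvMatch rn ru iu L i := by
  fun_induction pyAScan rn ru iu L pos with
  | case1 pos idx h =>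
    simp only [Bool.false_eq_true, false_iff]
    rintro ⟨i, hpi, hlen, hpre, _, _⟩
    by_cases hk : pos ≤ ru.length
    · have hne : iu <:+: ru.drop pos := pvPrefix_drop_infix hpi hpre
      exact ((PySem.Chars.findFrom_natCast_eq_neg_one_iff ru iu pos hk).1 h) hne
    · omega
  | case2 pos idx h i hcond =>
    simp only [true_iff]
    have hk : pos ≤ ru.length := (pvFindFromBound ru iu pos h).2
    obtain ⟨h1, h2, h3⟩ := PySem.Chars.findFrom_natCast_spec ru iu pos hk h
    have hi : pos ≤ i := by simp only [i]; omega
    have hile : i ≤ ru.length := by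
      by_contra hgt
      have hnil : ru.drop i = [] := List.drop_eq_nil_of_le (by omega)
      have hiu : iu = [] := List.eq_nil_of_prefix_nil (hnil ▸ h2)
      exact h3 pos le_rfl (by omega) (by simp [hiu])
    rw [Bool.and_eq_true] at hcond
    exact ⟨i, hi, hile, h2, hcond.1, hcond.2⟩
  | case3 pos idx h i hcond ih =>
    have hk : pos ≤ ru.length := (pvFindFromBound ru iu pos h).2
    obtain ⟨h1, h2, h3⟩ := PySem.Chars.findFrom_natCast_spec ru iu pos hk h
    rw [ih]
    constructor
    · rintro ⟨j, hj, hm⟩; exact ⟨j, by omega, hm⟩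
    · rintro ⟨j, hj, hm⟩
      refine ⟨j, ?_, hm⟩
      rcases Nat.lt_or_ge j (i + 1) with hlt | hge
      · exfalso
        rcases Nat.lt_or_ge j i with hlt' | hge'
        · exact h3 j hj (by simp only [i] at hlt' ⊢; omega) hm.2.1
        · have hji : j = i := by omega
          subst hji
          obtain ⟨-, -, hs, he⟩ := hm
          simp only [pvStartB] at hs
          simp only [pvEndB] at he
          exact hcond (by rw [Bool.and_eq_true]; exact ⟨hs, he⟩)
      · exact hge

theorem pvA_iff (raw_name : String) (instances : List String) :
    name_mentions_instance_py raw_name instances = true ↔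
    ∃ inst ∈ instances, ∃ i,
      pvMatch raw_name.toList (PySem.Chars.upper raw_name.toList)
        (PySem.Chars.upper inst.toList) inst.toList.length i := by
  simp only [name_mentions_instance_py, List.any_eq_true, pvAScan_iff]
  constructor
  · rintro ⟨inst, hmem, j, _, hm⟩; exact ⟨inst, hmem, j, hm⟩
  · rintro ⟨inst, hmem, j, hm⟩; exact ⟨inst, hmem, j, Nat.zero_le j, hm⟩

theorem pvB_iff (raw_name : String) (instances : List String) :
    name_mentions_instance_py_alt raw_name instances = true ↔
    ∃ inst ∈ instances, ∃ i,
      pvMatch raw_name.toList (PySem.Chars.upper raw_name.toList)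
        (PySem.Chars.upper inst.toList) inst.toList.length i := by
  have hz : instances.zip (instances.map (fun inst => PySem.Chars.upper inst.toList))
      = instances.map (fun inst => (inst, PySem.Chars.upper inst.toList)) := by
    have h := @List.zip_map' _ _ _ id (fun inst => PySem.Chars.upper inst.toList) instances
    simpa using h
  simp only [name_mentions_instance_py_alt, hz, List.any_eq_true, List.mem_range,
    List.mem_map, Bool.and_eq_true]
  constructor
  · rintro ⟨i, hi, hs, p, ⟨inst, hmem, rfl⟩, hsw, he⟩
    refine ⟨inst, hmem, i, ?_, ?_, hs, he⟩
    · simpa [PySem.Chars.upper] using Nat.lt_succ_iff.1 hi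
    · exact (PySem.Chars.startswith_iff _ _).1 hsw
  · rintro ⟨inst, hmem, i, hlen, hpre, hs, he⟩
    refine ⟨i, ?_, hs, ⟨inst, PySem.Chars.upper inst.toList⟩, ⟨inst, hmem, rfl⟩,
      (PySem.Chars.startswith_iff _ _).2 hpre, he⟩
    have : (PySem.Chars.upper raw_name.toList).length = raw_name.toList.length := by
      simp [PySem.Chars.upper]
    omega

-- ===== VERDICT (by name: the statement is the Claim_ definition above) =====
theorem name_mentions_instance_py_spec : Claim_equal_name_mentions_instance_py := by
  intro raw_name instances _
  unfold Spec_name_mentions_instance_py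
  rw [Bool.eq_iff_iff, pvA_iff, pvB_iff]
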